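-- pv_equiv track=rewrite | github.com/vishnuvardhanreddy31/GFG_POTD_SOLUTIONS | MARCH/09-03-2024.py | nthCharacter
-- ===== SOURCE A (Python) =====
-- def nthCharacter(s, r, n):
--     while r > 0:
--         m = ""
--         for i in range(min(len(s), n+1)):
--             if s[i] == '1':
--                 m += "10"
--             else:
--                 m += "01"
--
--         s = m
--         r -= 1
--
--     return s[n]
-- ===== SOURCE B (Python) =====
-- def nthCharacter(s, r, n):
--     if r <= 0:
--         return s[n]
--     # Trace position n back through the r substitution rounds:
--     # it descends from source position n >> r, flipped once per 1-bit
--     # among the low r bits of n.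
--     i = n >> r
--     parity = bin(n - (i << r)).count("1") & 1
--     one = (s[i] == '1') != (parity == 1)
--     return '1' if one else '0'
-- ===== Notes on version B (the rewrite author's own statement) =====
-- stated objective: faster
-- what changed: Instead of materially rebuilding the string r times (each round substituting '1'->'10', other->'01' over the first min(len,n+1) chars) and indexing, B traces position n back through the r rounds arithmetically: the answer is s[n >> r] flipped iff the popcount of the low r bits of n is odd.
import Mathlib
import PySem

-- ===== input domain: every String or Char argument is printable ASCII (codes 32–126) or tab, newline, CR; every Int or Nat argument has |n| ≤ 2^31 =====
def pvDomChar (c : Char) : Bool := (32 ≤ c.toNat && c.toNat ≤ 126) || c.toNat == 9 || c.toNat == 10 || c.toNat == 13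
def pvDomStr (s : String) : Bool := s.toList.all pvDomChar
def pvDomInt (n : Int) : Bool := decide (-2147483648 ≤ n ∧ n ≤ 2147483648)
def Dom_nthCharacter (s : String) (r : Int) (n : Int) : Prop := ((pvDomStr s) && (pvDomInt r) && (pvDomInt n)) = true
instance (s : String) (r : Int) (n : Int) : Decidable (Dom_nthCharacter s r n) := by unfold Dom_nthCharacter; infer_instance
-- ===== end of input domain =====

-- B replaces A's O(r·n) repeated string substitution by an O(r + log n) backward
-- position trace (bit arithmetic); equivalence proved on Pre_ (where A returns).


-- ===== PORT A =====
-- one pass of the while-loop body: m = ""; for i in range(min(len(s), n+1)): …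
def nthRound (cs : List Char) (n : Int) : List Char :=
  (PySem.List.pyRange 0 (min (cs.length : Int) (n + 1)) 1).foldl
    (fun m i => if PySem.List.pyGet? cs i = some '1' then m ++ ['1', '0'] else m ++ ['0', '1']) []

-- while r > 0: s = round(s); r -= 1
def nthLoop (cs : List Char) (r : Int) (n : Int) : List Char :=
  if 0 < r then nthLoop (nthRound cs n) (r - 1) n else cs
termination_by r.toNat
decreasing_by omega

def nthCharacter (s : String) (r : Int) (n : Int) : String :=
  match PySem.List.pyGet? (nthLoop s.toList r n) n with
  | some c => String.mk [c]     -- return s[n]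
  | none => ""                  -- Python raises IndexError here; excluded by Pre_

-- ===== PORT B =====
-- bin(m).count("1")
def pvPopcount : Nat → Nat
  | 0 => 0
  | (m + 1) => ((m + 1) % 2) + pvPopcount ((m + 1) / 2)

def nthCharacter_alt (s : String) (r : Int) (n : Int) : String :=
  if r ≤ 0 then
    match PySem.List.pyGet? s.toList n with
    | some c => String.mk [c]   -- return s[n]
    | none => ""                -- IndexError; excluded by Pre_
  else
    -- i = n >> r ; exact for 0 ≤ n, which Pre_ guarantees in this branch
    let i : Nat := n.toNat >>> r.toNat
    -- parity = bin(n - (i << r)).count("1") & 1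
    let parity : Nat := pvPopcount (n.toNat - (i <<< r.toNat)) % 2
    match PySem.List.pyGet? s.toList (i : Int) with
    | some c => if (c == '1') != decide (parity = 1) then "1" else "0"
    | none => ""                -- IndexError; excluded by Pre_

-- ===== PRECONDITION & SPEC =====
-- Pre_ holds exactly where A returns (elsewhere A raises IndexError on s[n]):
-- for r ≤ 0 the index n must be in Python range of s; for r > 0 the traced-back
-- source position n >> r must exist, i.e. 0 ≤ n and n >> r < len(s).
def Pre_nthCharacter (s : String) (r : Int) (n : Int) : Prop :=
  if 0 < r then 0 ≤ n ∧ n.toNat >>> r.toNat < s.toList.length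
  else PySem.Raise.InRange s.toList.length n
instance (s : String) (r : Int) (n : Int) : Decidable (Pre_nthCharacter s r n) := by
  unfold Pre_nthCharacter; infer_instance

def pvWitness_nthCharacter : String × Int × Int := ("0a1", 2, 9)

def Spec_nthCharacter (s : String) (r : Int) (n : Int) (out : String) : Prop := out = nthCharacter_alt s r n
instance (s : String) (r : Int) (n : Int) (out : String) : Decidable (Spec_nthCharacter s r n out) := by unfold Spec_nthCharacter; infer_instance

-- ===== CLAIM (what is proved, stated in full; the proofs are below) =====
def Claim_equal_nthCharacter : Prop := ∀ (s : String) (r : Int) (n : Int), Dom_nthCharacter s r n → Pre_nthCharacter s r n → Spec_nthCharacter s r n (nthCharacter s r n)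

-- ===== LEMMAS AND PROOFS =====

-- the Nat-indexed unfolding of A's while-loop
def nthLoopNat : Nat → List Char → Int → List Char
  | 0, cs, _ => cs
  | (t + 1), cs, n => nthLoopNat t (nthRound cs n) n

theorem nthLoop_eq_nat (cs : List Char) (r n : Int) :
    nthLoop cs r n = nthLoopNat r.toNat cs n := by
  generalize hk : r.toNat = k
  induction k generalizing r cs with
  | zero =>
    unfold nthLoop
    rw [if_neg (by omega)]
    rfl
  | succ t ih =>
    unfold nthLoop
    rw [if_pos (by omega)]
    have : (r - 1).toNat = t := by omega
    rw [ih (nthRound cs n) (r - 1) this]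
    rfl

theorem nthRound_flatMap (cs : List Char) (n : Int) :
    nthRound cs n =
      (PySem.List.pyRange 0 (min (cs.length : Int) (n + 1)) 1).flatMap
        (fun i => if PySem.List.pyGet? cs i = some '1' then ['1', '0'] else ['0', '1']) := by
  unfold nthRound
  have hbody : (fun (m : List Char) (i : Int) =>
      if PySem.List.pyGet? cs i = some '1' then m ++ ['1', '0'] else m ++ ['0', '1']) =
      (fun (m : List Char) (i : Int) =>
        m ++ (if PySem.List.pyGet? cs i = some '1' then ['1', '0'] else ['0', '1'])) := by
    funext m i
    by_cases h : PySem.List.pyGet? cs i = some '1' <;> simp [h]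
  rw [hbody, PySem.List.foldl_append_eq_flatMap]
  simp

-- generic: indexing into a flatMap whose blocks all have length 2
theorem flatMap_two_get {α β : Type} [Inhabited α] [Inhabited β] (f : α → List β) (hf : ∀ a, (f a).length = 2) :
    ∀ (l : List α) (j : Nat), j < 2 * l.length →
      (l.flatMap f)[j]? = (f (l[j / 2]!))[j % 2]? := by
  intro l
  induction l with
  | nil => intro j hj; simp at hj
  | cons a l ih =>
    intro j hj
    by_cases h2 : j < 2
    · have hj2 : j / 2 = 0 := by omega
      have hjm : j % 2 = j := by omega
      rw [List.flatMap_cons, hj2, hjm]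
      have : j < (f a).length := by rw [hf a]; omega
      simp [List.getElem?_append_left this]
    · have hlen : (f a).length ≤ j := by rw [hf a]; omega
      rw [List.flatMap_cons, List.getElem?_append_right hlen]
      have h1 : j - (f a).length = j - 2 := by rw [hf a]
      rw [h1, ih (j - 2) (by simp at hj ⊢; omega)]
      have hd : (j - 2) / 2 = j / 2 - 1 := by omega
      have hm : (j - 2) % 2 = j % 2 := by omega
      have hg : (a :: l)[j / 2]! = l[j / 2 - 1]! := by
        have : 0 < j / 2 := by omega
        rcases Nat.exists_eq_add_of_lt this with ⟨k, hk⟩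
        simp only [show j / 2 = k + 1 by omega]
        simp
      rw [hd, hm, hg]

theorem nthRound_length (cs : List Char) (n : Int) (hn : 0 ≤ n) :
    (nthRound cs n).length = 2 * min cs.length (n.toNat + 1) := by
  rw [nthRound_flatMap]
  rw [List.length_flatMap]
  have hall : ∀ i ∈ PySem.List.pyRange 0 (min (cs.length : Int) (n + 1)) 1,
      ((fun i => if PySem.List.pyGet? cs i = some '1' then ['1', '0'] else ['0', '1']) i).length = 2 := by
    intro i _
    by_cases h : PySem.List.pyGet? cs i = some '1' <;> simp [h]
  rw [List.sum_eq_card_nsmul _ 2 (by intro x hx; rcases List.mem_map.1 hx with ⟨i, hi, rfl⟩; exact hall i hi)]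
  simp [PySem.List.length_pyRange_one]
  omega

theorem nthRound_get (cs : List Char) (n : Int) (j : Nat) (hn : 0 ≤ n)
    (hj : j < 2 * min cs.length (n.toNat + 1)) :
    (nthRound cs n)[j]? =
      some (if (cs[j / 2]! == '1') != decide (j % 2 = 1) then '1' else '0') := by
  rw [nthRound_flatMap]
  have hlen2 : ∀ i : Int,
      ((fun i => if PySem.List.pyGet? cs i = some '1' then ['1', '0'] else ['0', '1']) i).length = 2 := by
    intro i; by_cases h : PySem.List.pyGet? cs i = some '1' <;> simp [h]
  have hrangelen : (PySem.List.pyRange 0 (min (cs.length : Int) (n + 1)) 1).length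
      = min cs.length (n.toNat + 1) := by
    rw [PySem.List.length_pyRange_one]; omega
  rw [flatMap_two_get _ hlen2 _ j (by omega)]
  have hj2 : j / 2 < min cs.length (n.toNat + 1) := by omega
  have hidx : (PySem.List.pyRange 0 (min (cs.length : Int) (n + 1)) 1)[j / 2]! = (j / 2 : Int) := by
    have h' : j / 2 < (PySem.List.pyRange 0 (min (cs.length : Int) (n + 1)) 1).length := by omega
    rw [List.getElem!_eq_getElem?_getD, List.getElem?_eq_getElem h', PySem.List.getElem_pyRange_one]
    simp
  rw [hidx]
  have hc2 : ((j : Int)) / 2 = ((j / 2 : Nat) : Int) := by omega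
  rw [hc2]
  have hcs : j / 2 < cs.length := by omega
  have hget : PySem.List.pyGet? cs ((j / 2 : Nat) : Int) = some cs[j / 2]! := by
    rw [PySem.List.pyGet?_natCast, List.getElem?_eq_getElem hcs, List.getElem!_eq_getElem?_getD,
      List.getElem?_eq_getElem hcs]
    simp
  rw [hget]
  have hm : j % 2 = 0 ∨ j % 2 = 1 := by omega
  have hbang : cs[j / 2]! = cs[j / 2]'hcs := by
    simp [List.getElem!_eq_getElem?_getD, List.getElem?_eq_getElem hcs]
  rw [hbang]
  by_cases h1 : cs[j / 2]'hcs = '1' <;> rcases hm with h | h <;> simp [h1, h]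

-- unfolding of pvPopcount at a nonzero argument
theorem pvPopcount_succ (k : Nat) (hk : k ≠ 0) : pvPopcount k = k % 2 + pvPopcount (k / 2) := by
  rcases Nat.exists_eq_succ_of_ne_zero hk with ⟨m, rfl⟩
  simp only [pvPopcount]

-- popcount splits over disjoint bit ranges
theorem pvPopcount_split (k : Nat) : ∀ (a b : Nat), a < 2 ^ k →
    pvPopcount (a + 2 ^ k * b) = pvPopcount a + pvPopcount b := by
  induction k with
  | zero =>
    intro a b ha
    have ha0 : a = 0 := by omega
    simp [ha0, pvPopcount]
  | succ t ih =>
    intro a b ha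
    by_cases hz : a + 2 ^ (t + 1) * b = 0
    · have ha0 : a = 0 := by omega
      have hb0 : b = 0 := by
        have hz' : 2 ^ (t + 1) * b = 0 := by omega
        rcases Nat.mul_eq_zero.1 hz' with h | h
        · have hpow : 0 < 2 ^ (t + 1) := pow_pos (by norm_num) (t + 1)
          omega
        · exact h
      simp [ha0, hb0, pvPopcount]
    · rw [pvPopcount_succ _ hz]
      have h2 : 2 ^ (t + 1) = 2 * 2 ^ t := by ring
      have h3 : 2 ^ (t + 1) * b = 2 * (2 ^ t * b) := by rw [h2]; ring
      have hmod : (a + 2 ^ (t + 1) * b) % 2 = a % 2 := by omega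
      have hdiv : (a + 2 ^ (t + 1) * b) / 2 = a / 2 + 2 ^ t * b := by omega
      have hat : a / 2 < 2 ^ t := by omega
      rw [hmod, hdiv, ih (a / 2) b hat]
      by_cases hz2 : a = 0
      · simp [hz2, pvPopcount]
      · rw [pvPopcount_succ a hz2]
        omega

-- bit t of n, extracted arithmetically
theorem mod_pow_succ_split (m t : Nat) :
    m % 2 ^ (t + 1) = m % 2 ^ t + 2 ^ t * (m / 2 ^ t % 2) := by
  have h1 : 2 ^ (t + 1) = 2 ^ t * 2 := by ring
  rw [h1, Nat.mod_mul]

-- core invariant of A's loop: the character at position n after r ≥ 1 rounds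
theorem loop_get (r : Nat) : ∀ (cs : List Char) (n : Int), 0 < r → 0 ≤ n →
    n.toNat >>> r < cs.length →
    (nthLoopNat r cs n)[n.toNat]? =
      some (if (cs[n.toNat >>> r]! == '1') != decide (pvPopcount (n.toNat % 2 ^ r) % 2 = 1)
            then '1' else '0') := by
  induction r with
  | zero => intro cs n h0; omega
  | succ t ih =>
    intro cs n _ hn hlt
    by_cases ht : t = 0
    · subst ht
      show (nthRound cs n)[n.toNat]? = _
      have hsh : n.toNat >>> 1 = n.toNat / 2 := by simp [Nat.shiftRight_succ]
      have hlt' : n.toNat / 2 < cs.length := by rw [← hsh]; exact hlt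
      rw [nthRound_get cs n n.toNat hn (by omega)]
      have hp : pvPopcount (n.toNat % 2 ^ 1) % 2 = n.toNat % 2 := by
        have h2 : n.toNat % 2 ^ 1 = n.toNat % 2 := by norm_num
        rw [h2]
        have : n.toNat % 2 = 0 ∨ n.toNat % 2 = 1 := by omega
        rcases this with h | h <;> rw [h] <;> simp [pvPopcount]
      rw [hsh, hp]
    · -- t ≥ 1 : one round then IH on the shorter loop
      show (nthLoopNat t (nthRound cs n) n)[n.toNat]? = _
      have hnn : n.toNat >>> (t + 1) = n.toNat >>> t / 2 := by
        rw [Nat.shiftRight_succ]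
      have hshle : n.toNat >>> t ≤ n.toNat := Nat.shiftRight_le _ _
      have hlen : (nthRound cs n).length = 2 * min cs.length (n.toNat + 1) :=
        nthRound_length cs n hn
      have hlt2 : n.toNat >>> t < (nthRound cs n).length := by
        rw [hlen]; omega
      rw [ih (nthRound cs n) n (by omega) hn hlt2]
      have hj : n.toNat >>> t < 2 * min cs.length (n.toNat + 1) := by omega
      have hval : (nthRound cs n)[n.toNat >>> t]! =
          (if (cs[n.toNat >>> t / 2]! == '1') != decide (n.toNat >>> t % 2 = 1) then '1' else '0') := by
        have := nthRound_get cs n (n.toNat >>> t) hn hj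
        rw [List.getElem!_eq_getElem?_getD, this]
        rfl
      rw [hval, ← hnn]
      -- combine the two flips: bit t of n joins the popcount of the low t bits
      have hpc : pvPopcount (n.toNat % 2 ^ (t + 1)) % 2
          = (pvPopcount (n.toNat % 2 ^ t) + n.toNat >>> t % 2) % 2 := by
        rw [mod_pow_succ_split n.toNat t,
          pvPopcount_split t (n.toNat % 2 ^ t) (n.toNat / 2 ^ t % 2) (Nat.mod_lt _ (by positivity))]
        rw [Nat.shiftRight_eq_div_pow]
        have h01 : n.toNat / 2 ^ t % 2 = 0 ∨ n.toNat / 2 ^ t % 2 = 1 := by omega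
        rcases h01 with h | h <;> rw [h] <;> simp [pvPopcount]
      by_cases hc : cs[n.toNat >>> (t + 1)]! = '1' <;>
        rcases Nat.mod_two_eq_zero_or_one (n.toNat >>> t) with hb | hb <;>
        rcases Nat.mod_two_eq_zero_or_one (pvPopcount (n.toNat % 2 ^ t)) with hp | hp <;>
        simp [hc, hb, hp, hpc, Nat.add_mod]

-- low bits of n as B computes them
theorem low_bits_eq (m r : Nat) : m - (m >>> r <<< r) = m % 2 ^ r := by
  rw [Nat.shiftLeft_eq, Nat.shiftRight_eq_div_pow]
  have h := Nat.div_add_mod m (2 ^ r)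
  have h2 : m / 2 ^ r * 2 ^ r = 2 ^ r * (m / 2 ^ r) := Nat.mul_comm _ _
  omega

-- ===== VERDICT (by name: the statement is the Claim_ definition above) =====
theorem nthCharacter_spec : Claim_equal_nthCharacter := by
  intro s r n _ hpre
  unfold Spec_nthCharacter nthCharacter nthCharacter_alt
  unfold Pre_nthCharacter at hpre
  by_cases hr : 0 < r
  · rw [if_pos hr] at hpre
    rw [if_neg (by omega)]
    obtain ⟨hn, hlt⟩ := hpre
    rw [nthLoop_eq_nat]
    have hr1 : 0 < r.toNat := by omega
    have hget := loop_get r.toNat s.toList n hr1 hn hlt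
    have hcast : PySem.List.pyGet? (nthLoopNat r.toNat s.toList n) n
        = (nthLoopNat r.toNat s.toList n)[n.toNat]? := by
      rw [PySem.List.pyGet?_of_nonneg _ hn]
    have hgetB : PySem.List.pyGet? s.toList ((n.toNat >>> r.toNat : Nat) : Int)
        = some s.toList[n.toNat >>> r.toNat]! := by
      rw [PySem.List.pyGet?_natCast, List.getElem?_eq_getElem hlt,
        List.getElem!_eq_getElem?_getD, List.getElem?_eq_getElem hlt]
      simp
    simp only [hcast, hget, low_bits_eq, hgetB]
    by_cases hb : (s.toList[n.toNat >>> r.toNat]! == '1')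
        != decide (pvPopcount (n.toNat % 2 ^ r.toNat) % 2 = 1)
    · simp only [hb, if_pos]
      rfl
    · simp only [Bool.not_eq_true] at hb
      simp only [hb]
      rfl
  · rw [if_neg hr] at hpre
    rw [if_pos (by omega)]
    unfold nthLoop
    rw [if_neg hr]
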